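-- pv_equiv track=rewrite | github.com/h00701350103/advent_of_code | 2019/day_4/code.py | star_two
-- ===== SOURCE A (Python) =====
-- def star_two(data):
--     def validate_password(password):
--         digits = str(password)
--
--         adjacent_digits = False
--         banned_digit = ''
--
--         for i in range(len(digits)-1):
--             if digits[i] != banned_digit:
--                 banned_digit = ''
--
--             if digits[i] > digits[i+1]:
--                 return False
--             if digits[i] == digits[i+1]:
--                 if i < len(digits) - 2 and digits[i] == digits[i+2]:
--                     banned_digit = digits[i]
--                     continue
--
--                 if digits[i] != banned_digit:
--                     adjacent_digits = True
--
--         return adjacent_digits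
--
--     result = 0
--     for password in data:
--         if validate_password(password):
--             result += 1
--     return result
-- ===== SOURCE B (Python) =====
-- def star_two(data):
--     def validate(password):
--         d = str(password)
--         # pass 1: must be non-decreasing
--         for i in range(len(d) - 1):
--             if d[i] > d[i + 1]:
--                 return False
--         # pass 2: some maximal run of equal characters has length exactly 2
--         i = 0
--         n = len(d)
--         while i < n:
--             j = i
--             while j < n and d[j] == d[i]:
--                 j += 1
--             if j - i == 2:
--                 return True
--             i = j
--         return False
--
--     return sum(1 for p in data if validate(p))
-- ===== Notes on version B (the rewrite author's own statement) =====
-- stated objective: simpler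
-- what changed: Replaced A's single-pass banned-digit state machine (with i+2 lookahead and a reset/continue protocol) by two plain passes: a non-decreasing check on adjacent characters, then a scan of maximal equal-character runs looking for one of length exactly 2.
import Mathlib
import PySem

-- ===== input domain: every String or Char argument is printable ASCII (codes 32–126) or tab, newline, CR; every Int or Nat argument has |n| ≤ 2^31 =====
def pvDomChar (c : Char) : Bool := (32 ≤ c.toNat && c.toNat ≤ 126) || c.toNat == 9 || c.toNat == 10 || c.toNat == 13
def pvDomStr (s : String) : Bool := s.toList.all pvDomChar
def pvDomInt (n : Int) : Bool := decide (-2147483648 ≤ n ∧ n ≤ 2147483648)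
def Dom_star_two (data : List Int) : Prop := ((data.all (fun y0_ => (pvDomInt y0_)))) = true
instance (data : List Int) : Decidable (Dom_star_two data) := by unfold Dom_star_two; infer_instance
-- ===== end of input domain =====

-- B replaces A's one-pass banned-digit state machine with two plain passes
-- (non-decreasing check, then a scan of maximal equal-character runs for one of
-- length exactly 2); same return value, objective: simpler.

-- ===== PORT A =====
-- A's for-loop over i (reading digits[i], digits[i+1], digits[i+2]) as structural
-- recursion over the suffix; state = (banned_digit, adjacent_digits); banned_digit ''
-- is `none`. Branches in the Python order.
def pvLoopA : List Char → Option Char → Bool → Bool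
  | a :: b :: rest, banned, adj =>
    -- if digits[i] != banned_digit: banned_digit = ''
    let banned1 : Option Char := if some a ≠ banned then none else banned
    -- if digits[i] > digits[i+1]: return False
    if b < a then false
    -- if digits[i] == digits[i+1]:
    else if a = b then
      -- if i < len(digits)-2 and digits[i] == digits[i+2]: banned_digit = digits[i]; continue
      if rest.head? = some a then pvLoopA (b :: rest) (some a) adj
      -- if digits[i] != banned_digit: adjacent_digits = True
      else if some a ≠ banned1 then pvLoopA (b :: rest) banned1 true
      else pvLoopA (b :: rest) banned1 adj
    else pvLoopA (b :: rest) banned1 adj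
  | _, _, adj => adj

def pvValidateA (password : Int) : Bool :=
  pvLoopA (PySem.Int.toChars password) none false

def star_two (data : List Int) : Int :=
  data.foldl (fun result password => if pvValidateA password then result + 1 else result) 0

-- ===== PORT B =====
-- pass 1 of Source B: the string must be non-decreasing (return False on d[i] > d[i+1])
def pvNonDec : List Char → Bool
  | a :: b :: rest => if b < a then false else pvNonDec (b :: rest)
  | _ => true

-- inner while of Source B's pass 2: length of the leading run of `a` in the rest
def pvCountLead (a : Char) : List Char → Nat
  | b :: r => if b = a then pvCountLead a r + 1 else 0
  | [] => 0

-- outer while of Source B's pass 2: some maximal run has length exactly 2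
def pvRunScan : List Char → Bool
  | [] => false
  | a :: r =>
    let k := pvCountLead a r
    if k + 1 = 2 then true else pvRunScan (r.drop k)
termination_by l => l.length
decreasing_by simp only [List.length_drop, List.length_cons]; omega

def pvValidateB (password : Int) : Bool :=
  let d := PySem.Int.toChars password
  if pvNonDec d then pvRunScan d else false

def star_two_alt (data : List Int) : Int :=
  ((data.countP (fun p => pvValidateB p) : Nat) : Int)

-- ===== PRECONDITION & SPEC =====
def Spec_star_two (data : List Int) (out : Int) : Prop := out = star_two_alt data
instance (data : List Int) (out : Int) : Decidable (Spec_star_two data out) := by unfold Spec_star_two; infer_instance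

-- ===== CLAIM (what is proved, stated in full; the proofs are below) =====
def Claim_equal_star_two : Prop := ∀ (data : List Int), Dom_star_two data → Spec_star_two data (star_two data)

-- ===== LEMMAS AND PROOFS =====

-- proof-only helper: the part of the string A's banned_digit mechanism still allows
-- to contribute a run (when banned matches the head, the leading run is a tail of an
-- already-banned longer run and is skipped).
def pvStrip : Option Char → List Char → List Char
  | some c, d => if d.head? = some c then d.dropWhile (fun x => x = c) else d
  | none, d => d

theorem pvRunScan_nil : pvRunScan [] = false := by simp [pvRunScan]

theorem pvRunScan_cons (a : Char) (r : List Char) :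
    pvRunScan (a :: r) = if pvCountLead a r + 1 = 2 then true else pvRunScan (r.drop (pvCountLead a r)) := by
  rw [pvRunScan]

theorem pvCountLead_eq_zero (a : Char) (r : List Char) (h : r.head? ≠ some a) :
    pvCountLead a r = 0 := by
  cases r with
  | nil => rfl
  | cons b t => simp at h; simp [pvCountLead, h]

theorem pvDrop_countLead (a : Char) (r : List Char) :
    r.drop (pvCountLead a r) = r.dropWhile (fun x => x = a) := by
  induction r with
  | nil => rfl
  | cons b t ih =>
    by_cases hb : b = a
    · simp [pvCountLead, hb, List.dropWhile, ih]
    · simp [pvCountLead, hb, List.dropWhile]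

theorem pvDropWhile_head_ne (c : Char) (r : List Char) (h : r.head? ≠ some c) :
    r.dropWhile (fun x => x = c) = r := by
  cases r with
  | nil => rfl
  | cons b t => simp at h; simp [List.dropWhile, h]

theorem pvStrip_nil (banned : Option Char) : pvStrip banned [] = [] := by
  cases banned <;> simp [pvStrip]

theorem pvLoopA_cons2 (a b : Char) (rest : List Char) (banned : Option Char) (adj : Bool) :
    pvLoopA (a :: b :: rest) banned adj =
      (let banned1 : Option Char := if some a ≠ banned then none else banned
       if b < a then false
       else if a = b then
         if rest.head? = some a then pvLoopA (b :: rest) (some a) adj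
         else if some a ≠ banned1 then pvLoopA (b :: rest) banned1 true
         else pvLoopA (b :: rest) banned1 adj
       else pvLoopA (b :: rest) banned1 adj) := by
  rw [pvLoopA]

-- the loop invariant: A's loop computes "non-decreasing AND (adj already set OR the
-- unbanned part of the string contains a maximal run of length exactly 2)".
theorem pvLoopA_spec (d : List Char) :
    ∀ (banned : Option Char) (adj : Bool),
      pvLoopA d banned adj = (pvNonDec d && (adj || pvRunScan (pvStrip banned d))) := by
  induction d with
  | nil =>
    intro banned adj
    rw [pvStrip_nil, pvRunScan_nil]
    simp [pvLoopA, pvNonDec]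
  | cons a t ih =>
    intro banned adj
    cases t with
    | nil =>
      have hrs : pvRunScan (pvStrip banned [a]) = false := by
        cases banned with
        | none => simp [pvStrip, pvRunScan_cons, pvCountLead, pvRunScan_nil]
        | some c =>
          by_cases hc : c = a
          · subst hc; simp [pvStrip, List.dropWhile, pvRunScan_nil]
          · simp [pvStrip, Ne.symm hc, pvRunScan_cons, pvCountLead, pvRunScan_nil]
      rw [hrs]
      simp [pvLoopA, pvNonDec]
    | cons b rest =>
      rw [pvLoopA_cons2]
      simp only [ih]
      by_cases hba : b < a
      · -- decreasing pair: both sides false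
        simp [hba, pvNonDec]
      · by_cases hab : a = b
        · subst hab
          by_cases hr : rest.head? = some a
          · -- run of length ≥ 3 from position 0: banned is set, continue
            obtain ⟨rest', hrest⟩ : ∃ rest', rest = a :: rest' := by
              cases rest with
              | nil => simp at hr
              | cons x xs => simp at hr; exact ⟨xs, by rw [hr]⟩
            subst hrest
            rw [if_neg hba, if_pos rfl, if_pos hr]
            have hnd : pvNonDec (a :: a :: a :: rest') = pvNonDec (a :: a :: rest') := by
              simp [pvNonDec]
            rw [hnd]
            have hs1 : pvStrip (some a) (a :: a :: rest') = rest'.dropWhile (fun x => x = a) := by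
              simp [pvStrip, List.dropWhile]
            rw [hs1]
            have hk : pvCountLead a (a :: a :: rest') = 2 + pvCountLead a rest' := by
              simp [pvCountLead]; omega
            have hskip : pvRunScan (a :: a :: a :: rest') = pvRunScan (rest'.dropWhile (fun x => x = a)) := by
              rw [pvRunScan_cons, hk, if_neg (by omega)]
              have hd : (a :: a :: rest').drop (2 + pvCountLead a rest') = rest'.drop (pvCountLead a rest') := by
                have h2 : 2 + pvCountLead a rest' = pvCountLead a rest' + 1 + 1 := by omega
                rw [h2]; rfl
              rw [hd, pvDrop_countLead]
            cases banned with
            | some c =>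
              by_cases hc : c = a
              · subst hc; simp [pvStrip, List.dropWhile]
              · have hs2 : pvStrip (some c) (a :: a :: a :: rest') = a :: a :: a :: rest' := by
                  simp [pvStrip, Ne.symm hc]
                rw [hs2, hskip]
            | none =>
              simp only [pvStrip]
              rw [hskip]
          · -- a run of length exactly 2 ends here
            rw [if_neg hba, if_pos rfl, if_neg hr]
            have hnd : pvNonDec (a :: a :: rest) = pvNonDec (a :: rest) := by
              simp [pvNonDec]
            rw [hnd]
            have hdw : rest.dropWhile (fun x => x = a) = rest := pvDropWhile_head_ne a rest hr
            by_cases hb : banned = some a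
            · -- banned: the pair does not count
              subst hb
              rw [if_neg (by simp), if_neg (by simp)]
              have h1 : pvStrip (some a) (a :: rest) = rest := by
                simp [pvStrip, List.dropWhile, hdw]
              have h2 : pvStrip (some a) (a :: a :: rest) = rest := by
                simp [pvStrip, List.dropWhile, hdw]
              rw [h1, h2]
            · -- not banned: adjacent_digits becomes True; RHS: run of length 2 found
              have hb1 : (if some a ≠ banned then none else banned) = (none : Option Char) := by
                rw [if_pos]; intro h; exact hb h.symm
              rw [hb1, if_pos (by simp : some a ≠ (none : Option Char))]
              have hrs : pvRunScan (pvStrip banned (a :: a :: rest)) = true := by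
                have hs : pvStrip banned (a :: a :: rest) = a :: a :: rest := by
                  cases banned with
                  | none => rfl
                  | some c =>
                    have hc : c ≠ a := fun h => hb (by rw [h])
                    simp [pvStrip, Ne.symm hc]
                rw [hs, pvRunScan_cons]
                have hk : pvCountLead a (a :: rest) = 1 := by
                  simp [pvCountLead, pvCountLead_eq_zero a rest hr]
                rw [hk]; rfl
              rw [hrs]
              simp [pvStrip]
        · -- strict increase: banned becomes irrelevant
          rw [if_neg hba, if_neg hab]
          have hnd : pvNonDec (a :: b :: rest) = pvNonDec (b :: rest) := by
            simp [pvNonDec, hba]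
          rw [hnd]
          have hbne : b ≠ a := fun h => hab h.symm
          have hsR : pvStrip (if some a ≠ banned then none else banned) (b :: rest) = b :: rest := by
            by_cases h : some a ≠ banned
            · simp [h, pvStrip]
            · rw [not_ne_iff] at h; rw [if_neg (by simp [← h]), ← h]
              simp [pvStrip, hbne]
          rw [hsR]
          have hscan : pvRunScan (a :: b :: rest) = pvRunScan (b :: rest) := by
            rw [pvRunScan_cons]
            have hk : pvCountLead a (b :: rest) = 0 := by simp [pvCountLead, hbne]
            rw [hk]; rfl
          cases banned with
          | none => simp only [pvStrip]; rw [hscan]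
          | some c =>
            by_cases hc : c = a
            · subst hc
              simp [pvStrip, List.dropWhile, hbne, pvRunScan_cons]
            · have hs : pvStrip (some c) (a :: b :: rest) = a :: b :: rest := by
                simp [pvStrip, Ne.symm hc]
              rw [hs, hscan]

theorem pvValidate_eq (p : Int) : pvValidateA p = pvValidateB p := by
  unfold pvValidateA pvValidateB
  rw [pvLoopA_spec]
  simp only [pvStrip, Bool.false_or]
  cases h1 : pvNonDec (PySem.Int.toChars p) <;> simp

-- ===== VERDICT (by name: the statement is the Claim_ definition above) =====
theorem star_two_spec : Claim_equal_star_two := by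
  intro data _
  unfold Spec_star_two star_two star_two_alt
  simp only [pvValidate_eq]
  rw [PySem.List.foldl_count_if (fun p => pvValidateB p) data 0]
  simp
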